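-- pv_equiv track=rewrite | github.com/kiscsonti/ContinueTheList | algorithm/graphwalk_functions_v4.py | exclude_path
-- ===== SOURCE A (Python) =====
-- def exclude_path(triples, paths):
--     valid_triples = list()
--     for trip in triples:
--         invalid_trip = False
--         for path in paths:
--             flag_holds = True
--             for i, path_element in enumerate(path):
--                 if path_element == "":
--                     continue
--                 elif trip[i] != path_element:
--                     flag_holds = False
--                     break
--             if flag_holds:
--                 invalid_trip = True
--         if invalid_trip is False:
--             valid_triples.append(trip)
--     return valid_triples
-- ===== SOURCE B (Python) =====
-- def exclude_path(triples, paths):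
--     # Build a hash index over the patterns ONCE: group them by their wildcard
--     # mask (the tuple of constrained positions) and store, per mask, the set of
--     # value tuples at those positions.  A triple then matches some pattern iff
--     # for some mask the triple's projection onto it is in that mask's bucket,
--     # so the per-triple work scans distinct masks with one hash lookup each
--     # instead of rescanning every pattern position by position.
--     index = {}
--     for path in paths:
--         items = [(i, e) for i, e in enumerate(path) if e != ""]
--         mask = tuple(i for i, _ in items)
--         vals = tuple(e for _, e in items)
--         index.setdefault(mask, set()).add(vals)
--     result = []
--     for trip in triples:
--         n = len(trip)
--         for mask, bucket in index.items():
--             if all(i < n for i in mask) and tuple(trip[i] for i in mask) in bucket: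
--                 break
--         else:
--             result.append(trip)
--     return result
-- ===== Notes on version B (the rewrite author's own statement) =====
-- stated objective: alternative
-- what changed: B builds a hash index of the patterns once (grouped by wildcard mask, each mask mapping to a set of projected value tuples) and matches each triple by projecting it onto each distinct mask and doing one set lookup, instead of A's per-triple rescan of every pattern with its positional wildcard loop.
import Mathlib
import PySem

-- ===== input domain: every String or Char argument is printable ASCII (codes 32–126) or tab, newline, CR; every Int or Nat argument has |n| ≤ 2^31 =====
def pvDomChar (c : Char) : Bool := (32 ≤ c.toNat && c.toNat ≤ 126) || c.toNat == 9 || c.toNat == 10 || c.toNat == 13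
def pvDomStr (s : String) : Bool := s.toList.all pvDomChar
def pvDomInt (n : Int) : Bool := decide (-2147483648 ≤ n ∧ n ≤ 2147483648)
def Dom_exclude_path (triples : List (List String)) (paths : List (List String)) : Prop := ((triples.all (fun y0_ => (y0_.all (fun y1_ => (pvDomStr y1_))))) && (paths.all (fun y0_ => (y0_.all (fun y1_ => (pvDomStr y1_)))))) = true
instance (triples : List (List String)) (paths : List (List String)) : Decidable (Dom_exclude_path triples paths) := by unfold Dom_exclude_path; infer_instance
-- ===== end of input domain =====

-- B indexes the patterns once into a dict keyed by wildcard mask (set of projected value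
-- tuples per mask) and matches each triple by projection + set lookup per distinct mask,
-- instead of A's per-pattern positional rescan (objective: alternative).

-- ===== PORT A =====
-- inner 'for i, path_element in enumerate(path)' loop; returns flag_holds
def pvGoA (trip : List String) : List String → Int → Bool
  | [], _ => true
  | e :: rest, i =>
    if e = "" then pvGoA trip rest (i + 1)
    else
      match PySem.List.pyGet? trip i with
      | none => false   -- trip[i] raises IndexError in Python; Pre_exclude_path excludes exactly these inputs
      | some v => if v ≠ e then false else pvGoA trip rest (i + 1)

-- 'for path in paths: … if flag_holds: invalid_trip = True'
def pvInvalidA (trip : List String) (paths : List (List String)) : Bool :=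
  paths.foldl (fun acc path => if pvGoA trip path 0 then true else acc) false

def exclude_path (triples : List (List String)) (paths : List (List String)) : List (List String) :=
  triples.foldl (fun acc trip => if pvInvalidA trip paths = false then acc ++ [trip] else acc) []

-- ===== PORT B =====
-- 'items = [(i, e) for i, e in enumerate(path) if e != ""]'
def pvItemsB : List String → Int → List (Int × String)
  | [], _ => []
  | e :: rest, i => if e = "" then pvItemsB rest (i + 1) else (i, e) :: pvItemsB rest (i + 1)

-- the pattern index: 'index.setdefault(mask, set()).add(vals)' mutates the bucket in place,
-- i.e. index[mask] = index.get(mask, set()) ∪ {vals} — exactly Dict.modify with Set.add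
def pvIndexB (paths : List (List String)) : PySem.Dict (List Int) (PySem.Set (List String)) :=
  paths.foldl (fun d path =>
    let items := pvItemsB path 0
    let mask := items.map Prod.fst
    let vals := items.map Prod.snd
    d.modify mask PySem.Set.empty (fun s => PySem.Set.add s vals)) PySem.Dict.empty

-- 'tuple(trip[i] for i in mask)': only evaluated when every i < n; a genuinely
-- out-of-range (negative) index would raise in Python, but masks built by pvItemsB are ≥ 0,
-- so the 'none' branch below is unreachable on the dict B builds
def pvProjB (trip : List String) (mask : List Int) : Option (List String) :=
  mask.mapM (fun i => PySem.List.pyGet? trip i)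

-- body of 'if all(i < n for i in mask) and tuple(trip[i] for i in mask) in bucket'
def pvMatchB (trip : List String) (mask : List Int) (bucket : PySem.Set (List String)) : Bool :=
  mask.all (fun i => decide (i < (trip.length : Int))) &&
    (match pvProjB trip mask with
     | some proj => PySem.Set.contains bucket proj
     | none => false)

def exclude_path_alt (triples : List (List String)) (paths : List (List String)) : List (List String) :=
  let index := pvIndexB paths
  triples.foldl (fun acc trip =>
    -- 'for mask, bucket in index.items(): if …: break / else: result.append(trip)'
    if index.items.any (fun p => pvMatchB trip p.1 p.2) then acc else acc ++ [trip]) []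

-- ===== PRECONDITION & SPEC =====
-- Pre_ excludes exactly the inputs on which Python A raises IndexError: some path whose first
-- non-wildcard position that fails against some triple lies beyond that triple's length.
def Pre_exclude_path (triples : List (List String)) (paths : List (List String)) : Prop :=
  ∀ trip ∈ triples, ∀ path ∈ paths,
    ¬ ∃ i < path.length, trip.length ≤ i ∧ path.getD i "" ≠ "" ∧
        ∀ j < i, path.getD j "" ≠ "" → j < trip.length ∧ trip.getD j "" = path.getD j ""
instance (triples : List (List String)) (paths : List (List String)) : Decidable (Pre_exclude_path triples paths) := by unfold Pre_exclude_path; infer_instance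

def pvWitness_exclude_path : List (List String) × List (List String) :=
  ([["a", "b"], ["a", "c"]], [["a", "b"]])

def Spec_exclude_path (triples : List (List String)) (paths : List (List String)) (out : List (List String)) : Prop := out = exclude_path_alt triples paths
instance (triples : List (List String)) (paths : List (List String)) (out : List (List String)) : Decidable (Spec_exclude_path triples paths out) := by unfold Spec_exclude_path; infer_instance

-- ===== CLAIM (what is proved, stated in full; the proofs are below) =====
def Claim_equal_exclude_path : Prop := ∀ (triples : List (List String)) (paths : List (List String)), Dom_exclude_path triples paths → Pre_exclude_path triples paths → Spec_exclude_path triples paths (exclude_path triples paths)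

-- ===== LEMMAS AND PROOFS =====

def pvMaskOf (path : List String) : List Int := (pvItemsB path 0).map Prod.fst
def pvValsOf (path : List String) : List String := (pvItemsB path 0).map Prod.snd

theorem pvItemsB_fst_le (path : List String) : ∀ (i : Int), ∀ q ∈ pvItemsB path i, i ≤ q.1 := by
  induction path with
  | nil => intro i q hq; simp [pvItemsB] at hq
  | cons e rest ih =>
    intro i q hq
    by_cases h : e = "" <;> simp only [pvItemsB, h, ite_true, ite_false, List.mem_cons] at hq
    · have := ih (i + 1) q hq; omega
    · rcases hq with rfl | hq
      · simp
      · have := ih (i + 1) q hq; omega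

-- A's inner wildcard loop succeeds iff every constraint pair of the path reads back from the triple
theorem pvGoA_iff (trip : List String) : ∀ (path : List String) (i : Int),
    pvGoA trip path i = true ↔ ∀ q ∈ pvItemsB path i, PySem.List.pyGet? trip q.1 = some q.2 := by
  intro path
  induction path with
  | nil => intro i; simp [pvGoA, pvItemsB]
  | cons e rest ih =>
    intro i
    by_cases h : e = "" <;> simp only [pvGoA, pvItemsB, h, ite_true, ite_false]
    · exact ih (i + 1)
    · cases hg : PySem.List.pyGet? trip i with
      | none =>
        dsimp only
        simp only [List.mem_cons, Bool.false_eq_true, false_iff]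
        intro hc
        have := hc (i, e) (Or.inl rfl)
        simp [hg] at this
      | some v =>
        dsimp only
        by_cases hv : v = e
        · subst hv
          rw [if_neg (by simp)]
          rw [ih (i + 1)]
          constructor
          · rintro hr q hq
            rcases List.mem_cons.mp hq with rfl | hq'
            · simpa using hg
            · exact hr q hq'
          · intro hc q hq; exact hc q (List.mem_cons.mpr (Or.inr hq))
        · rw [if_pos (by simp [hv])]
          simp only [List.mem_cons, Bool.false_eq_true, false_iff]
          intro hc
          have := hc (i, e) (Or.inl rfl)
          rw [hg] at this
          exact hv (by simpa using this)

-- the projection onto a path's mask yields exactly its vals iff every constraint pair reads back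
theorem pvProjB_eq_iff (trip : List String) (sig : List (Int × String)) :
    pvProjB trip (sig.map Prod.fst) = some (sig.map Prod.snd) ↔
      ∀ q ∈ sig, PySem.List.pyGet? trip q.1 = some q.2 := by
  induction sig with
  | nil => simp [pvProjB]
  | cons q rest ih =>
    simp only [List.map_cons, pvProjB, List.mapM_cons, Option.bind_eq_bind] at *
    cases hg : PySem.List.pyGet? trip q.1 with
    | none =>
      simp only [Option.bind_none, List.mem_cons]
      constructor
      · intro h; cases h
      · intro h; have := h q (Or.inl rfl); simp [hg] at this
    | some v =>
      cases hm : (rest.map Prod.fst).mapM (fun i => PySem.List.pyGet? trip i) with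
      | none =>
        simp only [Option.bind_some, Option.bind_none]
        constructor
        · intro h; cases h
        · intro h
          have : ((rest.map Prod.fst).mapM (fun i => PySem.List.pyGet? trip i) : Option (List String)) = some (rest.map Prod.snd) :=
            ih.mpr (fun p hp => h p (List.mem_cons_of_mem _ hp))
          rw [hm] at this; cases this
      | some vs =>
        simp only [Option.bind_some, Option.pure_def, Option.some.injEq, List.cons.injEq]
        constructor
        · rintro ⟨rfl, hvs⟩ p hp
          rcases List.mem_cons.mp hp with rfl | hp'
          · exact hg
          · exact (ih.mp (by rw [hm, hvs])) p hp'
        · intro h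
          have h1 := h q (List.mem_cons_self ..)
          rw [hg] at h1
          have h2 : ((rest.map Prod.fst).mapM (fun i => PySem.List.pyGet? trip i) : Option (List String)) = some (rest.map Prod.snd) :=
            ih.mpr (fun p hp => h p (List.mem_cons_of_mem _ hp))
          rw [hm] at h2
          exact ⟨by injection h1, by injection h2⟩

-- the index's bucket at mask m holds exactly the vals of the paths whose mask is m
theorem pvIndexB_getD_mem (paths : List (List String)) :
    ∀ (d : PySem.Dict (List Int) (PySem.Set (List String))) (m : List Int) (v : List String),
      v ∈ (paths.foldl (fun d path =>
          d.modify (pvMaskOf path) PySem.Set.empty (fun s => PySem.Set.add s (pvValsOf path))) d).getD m PySem.Set.empty ↔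
        v ∈ d.getD m PySem.Set.empty ∨ ∃ path ∈ paths, pvMaskOf path = m ∧ pvValsOf path = v := by
  induction paths with
  | nil => simp
  | cons p rest ih =>
    intro d m v
    rw [List.foldl_cons, ih]
    by_cases hm : m = pvMaskOf p
    · subst hm
      rw [PySem.Dict.getD_modify_self, PySem.Set.mem_add]
      constructor
      · rintro (⟨h | rfl⟩ | ⟨q, hq, h1, h2⟩)
        · exact Or.inl h
        · exact Or.inr ⟨p, List.mem_cons_self .., rfl, rfl⟩
        · exact Or.inr ⟨q, List.mem_cons_of_mem _ hq, h1, h2⟩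
      · rintro (h | ⟨q, hq, h1, h2⟩)
        · exact Or.inl (Or.inl h)
        · rcases List.mem_cons.mp hq with rfl | hq'
          · exact Or.inl (Or.inr h2.symm)
          · exact Or.inr ⟨q, hq', h1, h2⟩
    · rw [PySem.Dict.getD_modify_of_ne _ PySem.Set.empty (fun s => PySem.Set.add s (pvValsOf p)) hm]
      constructor
      · rintro (h | ⟨q, hq, h1, h2⟩)
        · exact Or.inl h
        · exact Or.inr ⟨q, List.mem_cons_of_mem _ hq, h1, h2⟩
      · rintro (h | ⟨q, hq, h1, h2⟩)
        · exact Or.inl h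
        · rcases List.mem_cons.mp hq with rfl | hq'
          · exact absurd h1.symm hm
          · exact Or.inr ⟨q, hq', h1, h2⟩

theorem pvIndexB_keys (paths : List (List String)) :
    (pvIndexB paths).keys = PySem.Set.ofList (paths.map pvMaskOf) := by
  unfold pvIndexB
  rw [PySem.Dict.keys_foldl_modify_key]
  simp only [PySem.Dict.keys_empty]
  rw [show (PySem.Set.update [] (paths.map (fun path => (pvItemsB path 0).map Prod.fst)) : PySem.Set (List Int)) =
    PySem.Set.ofList (paths.map (fun path => (pvItemsB path 0).map Prod.fst)) from PySem.Set.update_empty _]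
  rfl

theorem pvIndexB_nodup (paths : List (List String)) : (pvIndexB paths).keys.Nodup := by
  rw [pvIndexB_keys]; exact PySem.Set.nodup_ofList _

-- B's any over the index equals A's flag loop over the paths
theorem pvAny_eq_invalid (trip : List String) (paths : List (List String)) :
    (pvIndexB paths).items.any (fun p => pvMatchB trip p.1 p.2) = pvInvalidA trip paths := by
  unfold pvInvalidA
  rw [PySem.List.foldl_if_true_eq (fun path => pvGoA trip path 0), Bool.false_or]
  rw [Bool.eq_iff_iff]
  simp only [List.any_eq_true]
  constructor
  · rintro ⟨⟨m, bucket⟩, hmem, hmatch⟩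
    have hget : (pvIndexB paths).getD m PySem.Set.empty = bucket :=
      PySem.Dict.getD_of_mem_items _ hmem (pvIndexB_nodup paths) PySem.Set.empty
    -- the bucket is nonempty at the matching proj; pull out a path producing it
    rw [pvMatchB, Bool.and_eq_true] at hmatch
    obtain ⟨hall, hmemb⟩ := hmatch
    cases hp : pvProjB trip m with
    | none => rw [hp] at hmemb; cases hmemb
    | some proj =>
      rw [hp] at hmemb
      have hin : proj ∈ bucket := (PySem.Set.contains_iff _ _).mp hmemb
      rw [← hget] at hin
      rw [show pvIndexB paths = paths.foldl (fun d path => d.modify (pvMaskOf path) PySem.Set.empty (fun s => PySem.Set.add s (pvValsOf path))) PySem.Dict.empty from rfl] at hin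
      have := (pvIndexB_getD_mem paths PySem.Dict.empty m proj).mp hin
      rcases this with h | ⟨path, hpath, hmk, hvl⟩
      · simp [PySem.Dict.getD_empty, PySem.Set.empty] at h
      · refine ⟨path, hpath, ?_⟩
        rw [pvGoA_iff]
        subst hmk; subst hvl
        exact (pvProjB_eq_iff trip (pvItemsB path 0)).mp hp
  · rintro ⟨path, hpath, hgo⟩
    -- the path's mask is a key of the index; its bucket contains the path's vals
    have hkey : pvMaskOf path ∈ (pvIndexB paths).keys := by
      rw [pvIndexB_keys, PySem.Set.mem_ofList]
      exact List.mem_map.mpr ⟨path, hpath, rfl⟩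
    refine ⟨(pvMaskOf path, (pvIndexB paths).getD (pvMaskOf path) PySem.Set.empty), ?_, ?_⟩
    · rw [PySem.Dict.items_eq_map_keys _ (pvIndexB_nodup paths) PySem.Set.empty]
      exact List.mem_map.mpr ⟨pvMaskOf path, hkey, rfl⟩
    · dsimp only
      rw [pvMatchB, Bool.and_eq_true]
      have hproj : pvProjB trip (pvMaskOf path) = some (pvValsOf path) :=
        (pvProjB_eq_iff trip (pvItemsB path 0)).mpr ((pvGoA_iff trip path 0).mp hgo)
      refine ⟨?_, ?_⟩
      · rw [List.all_eq_true]
        intro i hi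
        obtain ⟨q, hq, rfl⟩ := List.mem_map.mp hi
        have hnn : 0 ≤ q.1 := pvItemsB_fst_le path 0 q hq
        have hs := (pvGoA_iff trip path 0).mp hgo q hq
        rw [show q.1 = ((q.1.toNat : Nat) : Int) from (Int.toNat_of_nonneg hnn).symm] at hs ⊢
        rw [PySem.List.pyGet?_natCast] at hs
        have : q.1.toNat < trip.length := by
          by_contra hge
          rw [List.getElem?_eq_none (by omega)] at hs
          cases hs
        simp only [decide_eq_true_eq]
        exact_mod_cast this
      · rw [hproj]
        refine (PySem.Set.contains_iff _ _).mpr ?_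
        show pvValsOf path ∈ (pvIndexB paths).getD (pvMaskOf path) PySem.Set.empty
        rw [show pvIndexB paths = paths.foldl (fun d path => d.modify (pvMaskOf path) PySem.Set.empty (fun s => PySem.Set.add s (pvValsOf path))) PySem.Dict.empty from rfl,
          pvIndexB_getD_mem paths PySem.Dict.empty]
        exact Or.inr ⟨path, hpath, rfl, rfl⟩

-- ===== VERDICT (by name: the statement is the Claim_ definition above) =====
theorem exclude_path_spec : Claim_equal_exclude_path := by
  intro triples paths hdom hpre
  unfold Spec_exclude_path exclude_path exclude_path_alt
  dsimp only
  rw [PySem.List.foldl_append_ite_eq_filter (fun trip => pvInvalidA trip paths = false)]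
  rw [show (fun (acc : List (List String)) trip =>
      if ((pvIndexB paths).items.any (fun p => pvMatchB trip p.1 p.2)) = true then acc else acc ++ [trip]) =
      (fun acc trip =>
      if (!((pvIndexB paths).items.any (fun p => pvMatchB trip p.1 p.2))) = true then acc ++ [trip] else acc) from by
    funext acc trip; cases h : (pvIndexB paths).items.any (fun p => pvMatchB trip p.1 p.2) <;> simp]
  rw [PySem.List.foldl_append_if_eq_filter (fun trip =>
    !((pvIndexB paths).items.any (fun p => pvMatchB trip p.1 p.2)))]
  simp only [List.nil_append]
  refine List.filter_congr ?_
  intro trip _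
  rw [pvAny_eq_invalid]
  rw [show ∀ (b : Bool), decide (b = false) = !b from by decide]
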